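-- pv_equiv track=rewrite | github.com/MHK183/Practice_Algorithms | 프로그래머스/lv0/120869. 외계어 사전/외계어 사전.py | solution
-- ===== SOURCE A (Python) =====
-- def solution(spell, dic):
--     answer = 2
--     for i in dic:
--         if len(i) >= len(spell):
--             for j in spell:
--                 i = i.replace(j, '', 1)
--             if len(i) == 0:
--                 answer = 1
--     return answer
-- ===== SOURCE B (Python) =====
-- def _residue(w, js):
--     if not js:
--         return w
--     j = js[0]
--     k = w.find(j)
--     if k != -1:
--         w = w[:k] + w[k + len(j):]
--     return _residue(w, js[1:])
--
--
-- def solution(spell, dic):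
--     return 1 if any(len(w) >= len(spell) and _residue(w, spell) == '' for w in dic) else 2
-- ===== Notes on version B (the rewrite author's own statement) =====
-- stated objective: alternative
-- what changed: A's flag-accumulator loop over the whole dictionary with an inner loop mutating each word via repeated str.replace(j,'',1) is replaced by an early-exiting any() over a recursive helper that removes the first occurrence of each spell entry by find plus slicing and compares the residue to the empty string.
import Mathlib
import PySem

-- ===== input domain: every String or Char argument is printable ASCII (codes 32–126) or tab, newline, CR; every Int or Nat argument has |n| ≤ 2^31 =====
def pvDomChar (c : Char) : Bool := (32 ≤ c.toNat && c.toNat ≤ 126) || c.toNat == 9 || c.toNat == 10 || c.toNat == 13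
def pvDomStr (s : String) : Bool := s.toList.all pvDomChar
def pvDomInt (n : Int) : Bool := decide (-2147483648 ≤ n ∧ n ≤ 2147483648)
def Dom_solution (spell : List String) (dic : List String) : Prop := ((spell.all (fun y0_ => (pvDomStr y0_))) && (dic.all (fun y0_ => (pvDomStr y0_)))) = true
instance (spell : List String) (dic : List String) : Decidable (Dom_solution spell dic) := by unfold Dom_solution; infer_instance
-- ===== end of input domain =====

-- B replaces A's accumulator loop and repeated str.replace mutation by an early-exiting any()
-- over a recursive first-occurrence-removal helper written with find and slicing (alternative decomposition, same cost).

-- ===== PORT A =====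
-- i.replace(j, '', 1): PySem has no count argument, so this is a step-for-step hand port
-- (exact: removes the first occurrence of j; j = '' or absent leaves the string unchanged, as CPython does).
def pyReplace1 (s : String) (j : String) : String :=
  let k := PySem.Str.find s j
  if k = -1 then s
  else String.ofList (s.toList.take k.toNat ++ s.toList.drop (k.toNat + j.toList.length))

def solution (spell : List String) (dic : List String) : Int :=
  dic.foldl (fun answer i =>
    if spell.length ≤ PySem.Str.len i then
      let i' := spell.foldl (fun acc j => pyReplace1 acc j) i
      if PySem.Str.len i' = 0 then 1 else answer
    else answer) 2

-- ===== PORT B =====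
-- k = w.find(j); if k != -1: w = w[:k] + w[k+len(j):]   — recursion over js (Source B's _residue)
def bResidue (w : String) (js : List String) : String :=
  match js with
  | [] => w
  | j :: rest =>
      let k := PySem.Str.find w j
      bResidue
        (if k ≠ -1 then
          String.ofList (PySem.Chars.slice w.toList none (some k) ++
                         PySem.Chars.slice w.toList (some (k + (PySem.Str.len j : Int))) none)
         else w) rest

def solution_alt (spell : List String) (dic : List String) : Int :=
  if dic.any (fun w => decide (spell.length ≤ PySem.Str.len w) && (bResidue w spell == "")) then 1 else 2

-- ===== PRECONDITION & SPEC =====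
def Spec_solution (spell : List String) (dic : List String) (out : Int) : Prop := out = solution_alt spell dic
instance (spell : List String) (dic : List String) (out : Int) : Decidable (Spec_solution spell dic out) := by unfold Spec_solution; infer_instance

-- ===== CLAIM (what is proved, stated in full; the proofs are below) =====
def Claim_equal_solution : Prop := ∀ (spell : List String) (dic : List String), Dom_solution spell dic → Spec_solution spell dic (solution spell dic)

-- ===== LEMMAS AND PROOFS =====

-- B's one removal step equals A's hand-ported replace(j, '', 1)
lemma cut_eq_replace1 (w j : String) :
    (if PySem.Str.find w j ≠ -1 then
       String.ofList (PySem.Chars.slice w.toList none (some (PySem.Str.find w j)) ++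
                      PySem.Chars.slice w.toList (some (PySem.Str.find w j + (PySem.Str.len j : Int))) none)
     else w) = pyReplace1 w j := by
  simp only [pyReplace1, PySem.Str.find_eq, PySem.Str.len_eq]
  by_cases h : PySem.Chars.find w.toList j.toList = -1
  · rw [if_neg (not_not_intro h), if_pos h]
  · rw [if_pos h, if_neg h]
    have hk : 0 ≤ PySem.Chars.find w.toList j.toList :=
      (PySem.Chars.find_nonneg_iff w.toList j.toList).mpr
        ((PySem.Chars.find_ne_neg_one_iff w.toList j.toList).mp h)
    rw [PySem.Chars.slice_eq_listSlice, PySem.Chars.slice_eq_listSlice,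
        PySem.List.slice_to w.toList hk, PySem.List.slice_from w.toList (by omega)]
    have hadd : (PySem.Chars.find w.toList j.toList + (j.toList.length : Int)).toNat
        = (PySem.Chars.find w.toList j.toList).toNat + j.toList.length := by omega
    rw [hadd]

lemma residue_eq_foldl (js : List String) (w : String) :
    bResidue w js = js.foldl (fun acc j => pyReplace1 acc j) w := by
  induction js generalizing w with
  | nil => rfl
  | cons j rest ih =>
      simp only [bResidue, List.foldl_cons]
      rw [cut_eq_replace1, ih]

lemma empty_iff_len (s : String) :
    (s == "") = decide (PySem.Str.len s = 0) := by
  by_cases hs : s.toList = []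
  · have h0 : s = "" := String.toList_eq_nil_iff.mp hs
    subst h0; decide
  · have hne : s ≠ "" := fun h => hs (by simp [h])
    simp [hne, PySem.Str.len_eq]

lemma foldl_answer (spell : List String) (l : List String) (a : Int) :
    l.foldl (fun answer i =>
      if spell.length ≤ PySem.Str.len i then
        let i' := spell.foldl (fun acc j => pyReplace1 acc j) i
        if PySem.Str.len i' = 0 then 1 else answer
      else answer) a
    = if l.any (fun w => decide (spell.length ≤ PySem.Str.len w) && (bResidue w spell == "")) then 1 else a := by
  induction l generalizing a with
  | nil => simp
  | cons w ws ih =>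
      simp only [List.foldl_cons, List.any_cons, ih, residue_eq_foldl, empty_iff_len]
      by_cases h1 : spell.length ≤ w.length <;>
        by_cases h2 : spell.foldl (fun acc j => pyReplace1 acc j) w = "" <;>
        simp [h1, h2]

-- ===== VERDICT (by name: the statement is the Claim_ definition above) =====
theorem solution_spec : Claim_equal_solution := by
  intro spell dic _
  unfold Spec_solution solution solution_alt
  rw [foldl_answer]
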